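-- pv_equiv track=rewrite | github.com/damazz/HQCA | hqca/state_tomography/_reduce_circuit.py | __find_largest_qwc
-- ===== SOURCE A (Python) =====
-- def __find_largest_qwc(A):
--     string = 'I'*len(A[0])
--     for j in range(len(string)):
--         done=False
--         while not done:
--             for i in A:
--                 if not i[j]=='I':
--                     string = string[:j]+i[j]+string[j+1:]
--                     done=True
--                     break
--             done=True
--     return string
-- ===== SOURCE B (Python) =====
-- def __find_largest_qwc(A):
--     # Row-major single pass: keep res[j]='I' until the first row with a non-'I'
--     # character in column j fills it; A instead rescans all rows per column.
--     n = len(A[0])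
--     res = ['I'] * n
--     for s in A:
--         res = [s[j] if res[j] == 'I' and s[j] != 'I' else res[j]
--                for j in range(n)]
--     return ''.join(res)
-- ===== Notes on version B (the rewrite author's own statement) =====
-- stated objective: alternative
-- what changed: Inverted the loop nesting: one row-major pass maintaining a per-column 'I' sentinel list rebuilt by a comprehension, instead of A's column-major loop that rescans all rows per column and rebuilds the string by slicing.
import Mathlib
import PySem

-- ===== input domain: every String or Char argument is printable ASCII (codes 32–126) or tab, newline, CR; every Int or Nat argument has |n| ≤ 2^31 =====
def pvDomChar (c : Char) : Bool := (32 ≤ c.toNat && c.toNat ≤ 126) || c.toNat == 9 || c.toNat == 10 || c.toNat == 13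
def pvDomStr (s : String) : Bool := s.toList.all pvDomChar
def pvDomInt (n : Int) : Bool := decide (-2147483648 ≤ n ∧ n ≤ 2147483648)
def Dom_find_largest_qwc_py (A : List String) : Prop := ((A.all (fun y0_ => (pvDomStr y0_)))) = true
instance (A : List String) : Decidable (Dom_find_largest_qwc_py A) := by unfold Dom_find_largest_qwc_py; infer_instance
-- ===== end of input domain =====

-- B replaces A's column-major loop (rescanning all rows per column, rebuilding the
-- string by slicing) with one row-major pass over A maintaining a per-column 'I'
-- sentinel list; an alternative decomposition of the same cost, not claimed faster.

-- ===== PORT A =====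
-- inner 'for i in A: if not i[j]=='I': string = string[:j]+i[j]+string[j+1:]; done=True; break'
-- (the surrounding 'while not done' runs its body exactly once: 'done=True' is reached unconditionally)
def findQwcInner (A : List (List Char)) (j : Int) (s : List Char) : List Char :=
  match A with
  | [] => s
  | i :: rest =>
    if ¬ (PySem.List.pyGetD i j ' ' = 'I') then
      PySem.List.slice s none (some j) ++ [PySem.List.pyGetD i j ' ']
        ++ PySem.List.slice s (some (j + 1)) none
    else findQwcInner rest j s

def find_largest_qwc_py (A : List String) : String :=
  -- string = 'I'*len(A[0]); A[0] raises IndexError on empty A (excluded by Pre_)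
  let string := List.replicate (A.headD "").toList.length 'I'
  String.ofList ((PySem.List.pyRange 0 (string.length : Int) 1).foldl
    (fun s j => findQwcInner (A.map String.toList) j s) string)

-- ===== PORT B =====
-- 'res = [s[j] if res[j]=='I' and s[j]!='I' else res[j] for j in range(n)]'
def qwcRow (n : Nat) (res : List Char) (s : List Char) : List Char :=
  (List.range n).map (fun j =>
    if res.getD j 'I' = 'I' ∧ s.getD j ' ' ≠ 'I' then s.getD j ' ' else res.getD j 'I')

def find_largest_qwc_py_alt (A : List String) : String :=
  let n := (A.headD "").toList.length
  String.ofList (A.foldl (fun res s => qwcRow n res s.toList) (List.replicate n 'I'))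

-- ===== PRECONDITION & SPEC =====
-- Pre_ excludes exactly the inputs on which Python A raises IndexError: the empty
-- list (A[0]), and ragged lists where some column scan reaches a string shorter than
-- A[0] before any earlier row supplies a non-'I' character in that column.
def Pre_find_largest_qwc_py (A : List String) : Prop :=
  A ≠ [] ∧ ∀ j < (A.headD "").toList.length, ∀ r < A.length,
    (A.getD r "").toList.length ≤ j →
      ∃ r' < r, j < (A.getD r' "").toList.length ∧ (A.getD r' "").toList.getD j ' ' ≠ 'I'
instance (A : List String) : Decidable (Pre_find_largest_qwc_py A) := by
  unfold Pre_find_largest_qwc_py; infer_instance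
def pvWitness_find_largest_qwc_py : List String := ["IXI", "ZII", "IYZ"]

def Spec_find_largest_qwc_py (A : List String) (out : String) : Prop := out = find_largest_qwc_py_alt A
instance (A : List String) (out : String) : Decidable (Spec_find_largest_qwc_py A out) := by unfold Spec_find_largest_qwc_py; infer_instance

-- ===== CLAIM (what is proved, stated in full; the proofs are below) =====
def Claim_equal_find_largest_qwc_py : Prop := ∀ (A : List String), Dom_find_largest_qwc_py A → Pre_find_largest_qwc_py A → Spec_find_largest_qwc_py A (find_largest_qwc_py A)

-- ===== LEMMAS AND PROOFS =====

-- first non-'I' character in column j (default 'I'): the common normal form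
def colF (As : List (List Char)) (j : Nat) : Char :=
  match As.find? (fun i => !(i.getD j ' ' == 'I')) with
  | some i => i.getD j ' '
  | none => 'I'

theorem findQwcInner_eq (As : List (List Char)) (j : Nat) (s : List Char) :
    findQwcInner As (j : Int) s =
      match As.find? (fun i => !(i.getD j ' ' == 'I')) with
      | some i => s.take j ++ [i.getD j ' '] ++ s.drop (j + 1)
      | none => s := by
  induction As with
  | nil => simp [findQwcInner]
  | cons i rest ih =>
    simp only [findQwcInner]
    by_cases h : PySem.List.pyGetD i (j : Int) ' ' = 'I'
    · rw [if_neg (not_not_intro h), ih, List.find?_cons_of_neg]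
      simp at h
      simp [h]
    · rw [if_pos h, List.find?_cons_of_pos]
      · simp at h
        have hc : ((j : Int) + 1) = ((j + 1 : Nat) : Int) := by push_cast; ring
        rw [PySem.List.slice_to_natCast, hc, PySem.List.slice_from_natCast]
        simp
      · simp at h
        simp [h]

theorem afold_invariant (As : List (List Char)) (n : Nat) :
    ∀ k, k ≤ n →
      (List.range k).foldl (fun (s : List Char) (j : Nat) => findQwcInner As (j : Int) s)
          (List.replicate n 'I')
        = (List.range k).map (colF As) ++ List.replicate (n - k) 'I' := by
  intro k
  induction k with
  | zero => simp
  | succ k ih =>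
    intro hk
    have hk' : k ≤ n := Nat.le_of_succ_le hk
    rw [List.range_succ, List.foldl_append, ih hk']
    simp only [List.foldl_cons, List.foldl_nil]
    rw [findQwcInner_eq]
    have hrep : List.replicate (n - k) 'I' = 'I' :: List.replicate (n - (k + 1)) 'I' := by
      have h1 : n - k = (n - (k + 1)) + 1 := by omega
      rw [h1, List.replicate_succ]
    have hlen : ((List.range k).map (colF As)).length = k := by simp
    cases hfind : As.find? (fun i => !(i.getD k ' ' == 'I')) with
    | none =>
      have hcol : colF As k = 'I' := by unfold colF; rw [hfind]
      rw [hrep, List.map_append]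
      simp [hcol]
    | some i =>
      have hcol : colF As k = i.getD k ' ' := by unfold colF; rw [hfind]
      have htake : (((List.range k).map (colF As)) ++ List.replicate (n - k) 'I').take k
          = (List.range k).map (colF As) := by
        rw [← hlen]; simp
      have hdrop : (((List.range k).map (colF As)) ++ List.replicate (n - k) 'I').drop (k + 1)
          = List.replicate (n - (k + 1)) 'I' := by
        rw [hrep, show k + 1 = ((List.range k).map (colF As)).length + 1 by rw [hlen]]
        simp [List.drop_append]
      rw [htake, hdrop, List.map_append]
      simp [hcol]

theorem colF_append_singleton (P : List (List Char)) (s : List Char) (j : Nat) :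
    colF (P ++ [s]) j =
      if colF P j = 'I' ∧ s.getD j ' ' ≠ 'I' then s.getD j ' ' else colF P j := by
  unfold colF
  rw [List.find?_append]
  cases h : P.find? (fun i => !(i.getD j ' ' == 'I')) with
  | some i =>
    have hi := List.find?_some h
    simp at hi
    simp [hi]
  | none =>
    by_cases hs : s[j]?.getD ' ' = 'I' <;> simp [hs]

theorem bfold_invariant (n : Nat) (S : List (List Char)) :
    ∀ P : List (List Char),
      S.foldl (fun res s => qwcRow n res s) ((List.range n).map (colF P))
        = (List.range n).map (colF (P ++ S)) := by
  induction S with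
  | nil => intro P; simp
  | cons s S' ih =>
    intro P
    have hstep : qwcRow n ((List.range n).map (colF P)) s
        = (List.range n).map (colF (P ++ [s])) := by
      unfold qwcRow
      apply List.map_congr_left
      intro j hj
      have hjn : j < n := List.mem_range.mp hj
      have hget : ((List.range n).map (colF P)).getD j 'I' = colF P j := by
        rw [List.getD_eq_getElem?_getD]
        simp [List.getElem?_range hjn]
      rw [hget, colF_append_singleton]
    rw [List.foldl_cons, hstep, ih (P ++ [s])]
    simp

theorem colF_nil (n : Nat) : (List.range n).map (colF []) = List.replicate n 'I' := by
  have h : colF [] = fun _ => 'I' := by funext j; simp [colF]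
  rw [h]
  simp [List.map_const']

-- ===== VERDICT (by name: the statement is the Claim_ definition above) =====
theorem find_largest_qwc_py_spec : Claim_equal_find_largest_qwc_py := by
  intro A _ _
  unfold Spec_find_largest_qwc_py find_largest_qwc_py find_largest_qwc_py_alt
  set n := (A.headD "").toList.length with hn
  set As := A.map String.toList with hAs
  simp only [List.length_replicate]
  -- A side: pyRange → List.range, then the column invariant
  have hrange : PySem.List.pyRange 0 (n : Int) 1
      = (List.range n).map (fun k : Nat => (k : Int)) := by
    rw [PySem.List.pyRange_one]
    simp
  rw [hrange, List.foldl_map]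
  have ha := afold_invariant As n n (le_refl n)
  rw [ha]
  simp only [Nat.sub_self, List.replicate_zero, List.append_nil]
  -- B side: fold over rows, then the row invariant
  have hb : A.foldl (fun res s => qwcRow n res s.toList) (List.replicate n 'I')
      = (List.range n).map (colF As) := by
    rw [← List.foldl_map (f := String.toList) (g := fun res s => qwcRow n res s), ← hAs]
    rw [← colF_nil n, bfold_invariant n As []]
    simp
  rw [hb]
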